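-- pv_equiv track=rewrite | github.com/oscarlally/XA_Dashboard | PhysicsDashboard/ScannerAnalysis/extract.py | split_sections_into_programs
-- ===== SOURCE A (Python) =====
-- def split_sections_into_programs(lines):
--     sections = []
--     current_section = []
--     failed_section = []
--
--     for i, line in enumerate(lines):
--         if '<Event type="UtilizationEvent" name ="Utilization"' in line:
--             next_line = lines[i + 1] if i + 1 < len(lines) else None
--             if next_line and ('Load workflow' in next_line or 'Load program' in next_line):
--             # if next_line and ('Load workflow' in next_line or 'Load program' in next_line):
--                 if current_section and len(current_section) > 2:
--                     sections.append(current_section)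
--                 elif current_section and len(current_section) <= 2:
--                     failed_section.append(current_section)
--                 current_section = [line.strip(), next_line.strip()]
--             else:
--                 current_section.append(line.strip())
--                 if next_line:
--                     current_section.append(next_line.strip())
--     if current_section:
--         sections.append(current_section)
--
--     return sections, failed_section
-- ===== SOURCE B (Python) =====
-- _MARK = '<Event type="UtilizationEvent" name ="Utilization"'
--
--
-- def split_sections_into_programs(lines):
--     # Stage 1: extract one record (stripped line, raw next line or None) per marker line.
--     recs = []
--     for i, line in enumerate(lines):
--         if _MARK in line:
--             recs.append((line.strip(), lines[i + 1] if i + 1 < len(lines) else None))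
--
--     def boundary(rec):
--         nxt = rec[1]
--         return bool(nxt) and ('Load workflow' in nxt or 'Load program' in nxt)
--
--     def contrib(rec):
--         s, nxt = rec
--         return [s, nxt.strip()] if nxt else [s]
--
--     def render_headless(chunk):
--         return [x for r in chunk for x in contrib(r)]
--
--     def render_headed(chunk):
--         head, tail = chunk[0], chunk[1:]
--         return [head[0], head[1].strip()] + [x for r in tail for x in contrib(r)]
--
--     # Stage 2: split the records into chunks; each boundary record opens a new chunk.
--     chunks = []
--     cur = []
--     for r in recs:
--         if boundary(r):
--             chunks.append(cur)
--             cur = [r]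
--         else:
--             cur.append(r)
--
--     # Stage 3: render each chunk to its text and classify.
--     if chunks:
--         # chunks[0] is the (possibly empty) headless prefix; the rest are boundary-headed.
--         secs = [render_headless(chunks[0])] + [render_headed(c) for c in chunks[1:]]
--         sections, failed = [], []
--         for sec in secs:
--             if sec:
--                 (sections if len(sec) > 2 else failed).append(sec)
--         sections.append(render_headed(cur))  # final chunk is headed, never empty
--         return sections, failed
--     last = render_headless(cur)
--     return ([last] if last else []), []
-- ===== Notes on version B (the rewrite author's own statement) =====
-- stated objective: alternative
-- what changed: Replaced A's single stateful loop (mutating current_section/sections/failed_section while scanning) by a three-stage pipeline: extract marker records, split the record list into chunks at Load-boundary records, then render each chunk to its section text and classify the rendered sections.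
import Mathlib
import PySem

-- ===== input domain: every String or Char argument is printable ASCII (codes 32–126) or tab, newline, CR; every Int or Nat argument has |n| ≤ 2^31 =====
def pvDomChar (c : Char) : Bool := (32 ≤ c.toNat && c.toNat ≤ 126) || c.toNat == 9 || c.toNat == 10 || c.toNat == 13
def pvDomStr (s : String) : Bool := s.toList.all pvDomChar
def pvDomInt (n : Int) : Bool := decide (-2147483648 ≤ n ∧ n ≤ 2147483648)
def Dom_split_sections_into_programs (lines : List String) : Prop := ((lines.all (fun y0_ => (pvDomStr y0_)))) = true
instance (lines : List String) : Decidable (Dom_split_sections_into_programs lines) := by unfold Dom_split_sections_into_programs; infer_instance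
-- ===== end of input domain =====

-- B replaces A's stateful single loop by a three-stage pipeline (extract marker records, split
-- them into chunks at boundaries, render and classify each chunk); same cost, proved equal.

def pvMark : String := "<Event type=\"UtilizationEvent\" name =\"Utilization\""

-- ===== PORT A =====
-- one iteration of A's loop over (i, line); state = (sections, current_section, failed_section)
def pvStepA (lines : List String) (st : List (List String) × List String × List (List String)) (p : Int × String) : List (List String) × List String × List (List String) :=
  if PySem.Str.isIn pvMark p.2 then
    match PySem.List.pyGet? lines (p.1 + 1) with
    | some nl =>
        if (nl != "") && (PySem.Str.isIn "Load workflow" nl || PySem.Str.isIn "Load program" nl) then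
          ( (if st.2.1 ≠ [] ∧ st.2.1.length > 2 then st.1 ++ [st.2.1] else st.1),
            [PySem.Str.strip p.2, PySem.Str.strip nl],
            (if st.2.1 ≠ [] ∧ ¬ st.2.1.length > 2 then st.2.2 ++ [st.2.1] else st.2.2) )
        else
          (st.1, st.2.1 ++ [PySem.Str.strip p.2] ++ (if nl != "" then [PySem.Str.strip nl] else []), st.2.2)
    | none => (st.1, st.2.1 ++ [PySem.Str.strip p.2], st.2.2)
  else st

def split_sections_into_programs (lines : List String) : List (List String) × List (List String) :=
  let st := (PySem.List.enumerate lines 0).foldl (pvStepA lines) ([], [], [])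
  ((if st.2.1 ≠ [] then st.1 ++ [st.2.1] else st.1), st.2.2)

-- ===== PORT B =====
-- stage 1: the record emitted for (i, line): (stripped line, raw next line or none)
def pvRec (lines : List String) (p : Int × String) : Option (String × Option String) :=
  if PySem.Str.isIn pvMark p.2 then some (PySem.Str.strip p.2, PySem.List.pyGet? lines (p.1 + 1)) else none

def pvBdy (r : String × Option String) : Bool :=
  match r.2 with
  | some nl => (nl != "") && (PySem.Str.isIn "Load workflow" nl || PySem.Str.isIn "Load program" nl)
  | none => false

def pvContrib (r : String × Option String) : List String :=
  r.1 :: (match r.2 with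
          | some nl => if nl != "" then [PySem.Str.strip nl] else []
          | none => [])

def pvRenderHeadless (ch : List (String × Option String)) : List String := ch.flatMap pvContrib

def pvRenderHeaded (ch : List (String × Option String)) : List String :=
  match ch with
  | [] => []
  | r :: t => r.1 :: PySem.Str.strip (r.2.getD "") :: t.flatMap pvContrib

-- stage 2: split the records into chunks; each boundary record opens a new chunk
def pvChunkStep (p : List (List (String × Option String)) × List (String × Option String)) (r : String × Option String) : List (List (String × Option String)) × List (String × Option String) :=
  if pvBdy r then (p.1 ++ [p.2], [r]) else (p.1, p.2 ++ [r])

-- stage 3: classify a rendered section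
def pvClassify (sf : List (List String) × List (List String)) (sec : List String) : List (List String) × List (List String) :=
  if sec ≠ [] then (if sec.length > 2 then (sf.1 ++ [sec], sf.2) else (sf.1, sf.2 ++ [sec])) else sf

def split_sections_into_programs_alt (lines : List String) : List (List String) × List (List String) :=
  let recs := (PySem.List.enumerate lines 0).filterMap (pvRec lines)
  let q := recs.foldl pvChunkStep ([], [])
  match q.1 with
  | [] =>
      let last := pvRenderHeadless q.2
      ((if last ≠ [] then [last] else []), [])
  | c0 :: rest =>
      let sf := ((pvRenderHeadless c0) :: rest.map pvRenderHeaded).foldl pvClassify ([], [])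
      (sf.1 ++ [pvRenderHeaded q.2], sf.2)

-- ===== PRECONDITION & SPEC =====
def Spec_split_sections_into_programs (lines : List String) (out : List (List String) × List (List String)) : Prop := out = split_sections_into_programs_alt lines
instance (lines : List String) (out : List (List String) × List (List String)) : Decidable (Spec_split_sections_into_programs lines out) := by unfold Spec_split_sections_into_programs; infer_instance

-- ===== CLAIM (what is proved, stated in full; the proofs are below) =====
def Claim_equal_split_sections_into_programs : Prop := ∀ (lines : List String), Dom_split_sections_into_programs lines → Spec_split_sections_into_programs lines (split_sections_into_programs lines)

-- ===== LEMMAS AND PROOFS =====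

-- A's behaviour on one marker record (proof-level reformulation of pvStepA)
def pvStepR (st : List (List String) × List String × List (List String)) (r : String × Option String) : List (List String) × List String × List (List String) :=
  match r.2 with
  | some nl =>
      if (nl != "") && (PySem.Str.isIn "Load workflow" nl || PySem.Str.isIn "Load program" nl) then
        ( (if st.2.1 ≠ [] ∧ st.2.1.length > 2 then st.1 ++ [st.2.1] else st.1),
          [r.1, PySem.Str.strip nl],
          (if st.2.1 ≠ [] ∧ ¬ st.2.1.length > 2 then st.2.2 ++ [st.2.1] else st.2.2) )
      else (st.1, st.2.1 ++ r.1 :: (if nl != "" then [PySem.Str.strip nl] else []), st.2.2)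
  | none => (st.1, st.2.1 ++ [r.1], st.2.2)

theorem pvStep_agree (lines : List String) (st : List (List String) × List String × List (List String)) (p : Int × String) :
    pvStepA lines st p = (pvRec lines p).elim st (pvStepR st) := by
  unfold pvStepA pvRec pvStepR
  by_cases hm : PySem.Str.isIn pvMark p.2 = true
  · simp only [hm, if_pos]
    cases hn : PySem.List.pyGet? lines (p.1 + 1) with
    | none => simp
    | some nl => simp
  · rw [if_neg hm]
    rw [if_neg hm]
    rfl

theorem pvFold_agree (lines : List String) (l : List (Int × String)) (st : List (List String) × List String × List (List String)) :
    l.foldl (pvStepA lines) st = (l.filterMap (pvRec lines)).foldl pvStepR st := by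
  induction l generalizing st with
  | nil => rfl
  | cons p t ih =>
    rw [List.foldl_cons, List.filterMap_cons]
    cases he : pvRec lines p with
    | none =>
      have := pvStep_agree lines st p
      rw [he] at this
      simp only [this, Option.elim]
      exact ih st
    | some r =>
      have := pvStep_agree lines st p
      rw [he] at this
      simp only [this, Option.elim, List.foldl_cons]
      exact ih (pvStepR st r)

theorem pvChunkStep_pos (p : List (List (String × Option String)) × List (String × Option String)) (r : String × Option String) (hb : pvBdy r = true) :
    pvChunkStep p r = (p.1 ++ [p.2], [r]) := by simp [pvChunkStep, hb]

theorem pvChunkStep_neg (p : List (List (String × Option String)) × List (String × Option String)) (r : String × Option String) (hb : ¬ pvBdy r = true) :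
    pvChunkStep p r = (p.1, p.2 ++ [r]) := by simp [pvChunkStep, hb]

-- chunk-fold: the accumulated chunks prepend
theorem pvChunk_acc (l : List (String × Option String)) (chs : List (List (String × Option String))) (cur : List (String × Option String)) :
    l.foldl pvChunkStep (chs, cur) = (chs ++ (l.foldl pvChunkStep ([], cur)).1, (l.foldl pvChunkStep ([], cur)).2) := by
  induction l generalizing chs cur with
  | nil => simp
  | cons r t ih =>
    by_cases hb : pvBdy r = true
    · simp only [List.foldl_cons, pvChunkStep_pos _ r hb, List.nil_append]
      rw [ih (chs ++ [cur]) [r], ih [cur] [r]]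
      simp
    · simp only [List.foldl_cons, pvChunkStep_neg _ r hb]
      exact ih chs (cur ++ [r])

-- chunk-fold: the initial current chunk merges into the first produced chunk
theorem pvChunk_cur (l : List (String × Option String)) (cur : List (String × Option String)) :
    l.foldl pvChunkStep ([], cur) =
      (match l.foldl pvChunkStep ([], []) with
       | ([], c) => (([] : List (List (String × Option String))), cur ++ c)
       | (c0 :: rr, c) => ((cur ++ c0) :: rr, c)) := by
  induction l generalizing cur with
  | nil => simp
  | cons r t ih =>
    by_cases hb : pvBdy r = true
    · simp only [List.foldl_cons, pvChunkStep_pos _ r hb, List.nil_append]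
      rw [pvChunk_acc t [cur] [r], pvChunk_acc t [[]] [r]]
      rcases ht : t.foldl pvChunkStep ([], [r]) with ⟨c1, c2⟩
      simp
    · simp only [List.foldl_cons, pvChunkStep_neg _ r hb, List.nil_append]
      rw [ih (cur ++ [r]), ih [r]]
      rcases ht : t.foldl pvChunkStep ([], []) with ⟨c1, c2⟩
      cases c1 <;> simp
-- once a chunk was produced, the current chunk is nonempty
theorem pvChunk_ne (l : List (String × Option String)) (p : List (List (String × Option String)) × List (String × Option String))
    (h : p.1 ≠ [] → p.2 ≠ []) :
    (l.foldl pvChunkStep p).1 ≠ [] → (l.foldl pvChunkStep p).2 ≠ [] := by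
  induction l generalizing p with
  | nil => exact h
  | cons r t ih =>
    by_cases hb : pvBdy r = true
    · simp only [List.foldl_cons, pvChunkStep_pos _ r hb]
      exact ih _ (fun _ => by simp)
    · simp only [List.foldl_cons, pvChunkStep_neg _ r hb]
      exact ih _ (fun _ => by simp)

theorem pvRenderHeaded_ne (ch : List (String × Option String)) (h : ch ≠ []) : pvRenderHeaded ch ≠ [] := by
  cases ch with
  | nil => exact absurd rfl h
  | cons r t => simp [pvRenderHeaded]

-- main invariant: the stateful fold equals the chunk pipeline
theorem pvMain (recs : List (String × Option String)) (S : List (List String)) (C : List String) (F : List (List String)) :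
    recs.foldl pvStepR (S, C, F) =
      (match recs.foldl pvChunkStep ([], []) with
       | ([], cur) => (S, C ++ pvRenderHeadless cur, F)
       | (c0 :: rest, cur) =>
           let sf := ((C ++ pvRenderHeadless c0) :: rest.map pvRenderHeaded).foldl pvClassify (S, F)
           (sf.1, pvRenderHeaded cur, sf.2)) := by
  induction recs generalizing S C F with
  | nil => simp [pvRenderHeadless]
  | cons r t ih =>
    simp only [List.foldl_cons]
    by_cases hb : pvBdy r = true
    · -- boundary: A flushes C and restarts; B opens a new chunk
      obtain ⟨nl, hnl, hcond⟩ : ∃ nl, r.2 = some nl ∧ ((nl != "") && (PySem.Str.isIn "Load workflow" nl || PySem.Str.isIn "Load program" nl)) = true := by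
        unfold pvBdy at hb
        cases hr : r.2 with
        | none => rw [hr] at hb; simp at hb
        | some nl => exact ⟨nl, rfl, by rw [hr] at hb; exact hb⟩
      have hstep : pvStepR (S, C, F) r =
          ((pvClassify (S, F) C).1, [r.1, PySem.Str.strip nl], (pvClassify (S, F) C).2) := by
        unfold pvStepR pvClassify
        rw [hnl]
        simp only [hcond, if_pos]
        by_cases hc : C = [] <;> by_cases hl : C.length > 2 <;> simp [hc, hl]
      have hrh : ∀ c : List (String × Option String), [r.1, PySem.Str.strip nl] ++ pvRenderHeadless c = pvRenderHeaded (r :: c) := by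
        intro c; simp [pvRenderHeaded, pvRenderHeadless, hnl]
      have hcs : pvChunkStep (([] : List (List (String × Option String))), ([] : List (String × Option String))) r = ([[]], [r]) := by
        simp [pvChunkStep_pos _ r hb]
      rw [hstep, ih, hcs]
      rw [pvChunk_acc t [[]] [r], pvChunk_cur t [r]]
      rcases ht : t.foldl pvChunkStep ([], []) with ⟨c1, c2⟩
      have hrhnil : pvRenderHeadless [] = [] := rfl
      cases c1 with
      | nil => simp [hrh, hrhnil]
      | cons c0 rr => simp [hrh, hrhnil]
    · -- non-boundary: A appends the contribution; B grows the current chunk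
      have hstep : pvStepR (S, C, F) r = (S, C ++ pvContrib r, F) := by
        unfold pvStepR pvContrib
        cases hr : r.2 with
        | none => simp
        | some nl =>
          have hb2 : ¬ ((nl != "") && (PySem.Str.isIn "Load workflow" nl || PySem.Str.isIn "Load program" nl)) = true := by
            unfold pvBdy at hb
            rw [hr] at hb
            exact hb
          simp
          intro h1 h2
          exfalso
          apply hb2
          cases h2 with
          | inl h => simp [h1, h]
          | inr h => simp [h1, h]
      have hrh : ∀ c : List (String × Option String), pvContrib r ++ pvRenderHeadless c = pvRenderHeadless (r :: c) := by
        intro c; simp [pvRenderHeadless]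
      have hcs : pvChunkStep (([] : List (List (String × Option String))), ([] : List (String × Option String))) r = ([], [r]) := by
        simp [pvChunkStep_neg _ r hb]
      rw [hstep, ih, hcs]
      rw [pvChunk_cur t [r]]
      rcases ht : t.foldl pvChunkStep ([], []) with ⟨c1, c2⟩
      cases c1 with
      | nil => simp [List.append_assoc, hrh]
      | cons c0 rr => simp [List.append_assoc, hrh]

-- ===== VERDICT (by name: the statement is the Claim_ definition above) =====
theorem split_sections_into_programs_spec : Claim_equal_split_sections_into_programs := by
  intro lines _
  unfold Spec_split_sections_into_programs split_sections_into_programs split_sections_into_programs_alt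
  rw [pvFold_agree, pvMain]
  rcases ht : ((PySem.List.enumerate lines 0).filterMap (pvRec lines)).foldl pvChunkStep ([], []) with ⟨c1, c2⟩
  simp only [ht]
  cases c1 with
  | nil => simp
  | cons c0 rr =>
    have hne : c2 ≠ [] := by
      have := pvChunk_ne ((PySem.List.enumerate lines 0).filterMap (pvRec lines)) ([], []) (by simp)
      rw [ht] at this
      exact this (by simp)
    simp [pvRenderHeaded_ne c2 hne]
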